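-- pv_equiv track=rewrite | github.com/eunchae-jeon/algorithm | Programmers/저울.py | solution
-- ===== SOURCE A (Python) =====
-- def solution(weight):
--     weight.sort()
--     able = 0
--     for w in weight:
--         if able + 1 >= w:
--             able += w
--         else:
--             break
--     return able + 1
-- ===== SOURCE B (Python) =====
-- def solution(weight):
--     weight.sort()
--     pre = [0]
--     for w in weight:
--         pre.append(pre[-1] + w)
--
--     def ok(k):
--         # the first k sorted weights leave no gap: each fits under (sum so far) + 1
--         return all(w <= p + 1 for p, w in zip(pre, weight[:k]))
--
--     lo, hi = 0, len(weight)
--     while lo < hi:                      # binary search for the largest k with ok(k)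
--         mid = (lo + hi + 1) // 2
--         if ok(mid):
--             lo = mid
--         else:
--             hi = mid - 1
--     return pre[lo] + 1
-- ===== Notes on version B (the rewrite author's own statement) =====
-- stated objective: alternative
-- what changed: Replaces A's linear greedy accumulation with an in-loop break by a two-stage algorithm: build the prefix-sum table of the sorted list, then binary-search (over the monotone predicate 'the first k weights leave no gap') for the largest gap-free prefix and return its prefix sum + 1.
import Mathlib
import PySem

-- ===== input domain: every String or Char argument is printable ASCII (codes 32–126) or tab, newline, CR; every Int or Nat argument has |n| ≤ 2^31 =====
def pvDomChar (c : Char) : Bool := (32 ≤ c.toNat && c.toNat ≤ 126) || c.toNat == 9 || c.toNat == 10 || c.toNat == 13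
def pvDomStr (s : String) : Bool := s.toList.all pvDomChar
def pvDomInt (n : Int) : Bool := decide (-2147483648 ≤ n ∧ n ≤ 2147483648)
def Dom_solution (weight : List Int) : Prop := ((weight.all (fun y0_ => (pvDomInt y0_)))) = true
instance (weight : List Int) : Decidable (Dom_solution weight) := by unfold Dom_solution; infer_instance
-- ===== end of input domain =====

-- B replaces A's linear greedy accumulation-with-break by a prefix-sum table plus a binary
-- search for the largest gap-free prefix (a monotone predicate); same return value, and the
-- equivalence is about the return value only (both sort the argument in place the same way).

-- ===== PORT A =====
-- weight.sort(); able = 0; for w: if able+1 >= w: able += w else break; return able+1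
def solution (weight : List Int) : Int :=
  let s := PySem.List.sorted weight (fun x => x) false
  (s.foldl
    (fun (st : Int × Bool) w =>
      if st.2 then st
      else if st.1 + 1 ≥ w then (st.1 + w, false) else (st.1, true))
    ((0 : Int), false)).1 + 1

-- ===== PORT B =====
-- ok(k) = all(w <= p + 1 for p, w in zip(pre, weight[:k]))
def pvOk (pre s : List Int) (k : Int) : Bool :=
  (pre.zip (PySem.List.slice s none (some k))).all (fun pw => decide (pw.2 ≤ pw.1 + 1))

-- while lo < hi: mid = (lo+hi+1)//2; if ok(mid): lo = mid else hi = mid - 1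
def pvBsearch (pre s : List Int) (lo hi : Int) : Int :=
  if h : lo < hi then
    let mid := PySem.Int.floordiv (lo + hi + 1) 2
    if pvOk pre s mid then pvBsearch pre s mid hi else pvBsearch pre s lo (mid - 1)
  else lo
termination_by (hi - lo).toNat
decreasing_by
  · have hb := PySem.Int.floordiv_two_mid_bounds (lo := lo + 1) (hi := hi) (by omega)
    have he : lo + hi + 1 = lo + 1 + hi := by ring
    rw [he]; omega
  · have hb := PySem.Int.floordiv_two_mid_bounds (lo := lo + 1) (hi := hi) (by omega)
    have he : lo + hi + 1 = lo + 1 + hi := by ring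
    rw [he]; omega

def solution_alt (weight : List Int) : Int :=
  let s := PySem.List.sorted weight (fun x => x) false
  -- pre = [0]; for w in weight: pre.append(pre[-1] + w)   (pre is never empty)
  let pre := s.foldl (fun acc w => acc ++ [PySem.List.pyGetD acc (-1) 0 + w]) [(0 : Int)]
  -- lo = binary search result; return pre[lo] + 1  (0 ≤ lo ≤ len(weight), so pyGetD is exact)
  PySem.List.pyGetD pre (pvBsearch pre s 0 (s.length : Int)) 0 + 1

-- ===== PRECONDITION & SPEC =====
def Spec_solution (weight : List Int) (out : Int) : Prop := out = solution_alt weight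
instance (weight : List Int) (out : Int) : Decidable (Spec_solution weight out) := by unfold Spec_solution; infer_instance

-- ===== CLAIM (what is proved, stated in full; the proofs are below) =====
def Claim_equal_solution : Prop := ∀ (weight : List Int), Dom_solution weight → Spec_solution weight (solution weight)

-- ===== LEMMAS AND PROOFS =====

-- the value A's greedy loop computes, as structural recursion
def pvGreedy : List Int → Int → Int
  | [], a => a + 1
  | w :: rest, a => if w > a + 1 then a + 1 else pvGreedy rest (a + w)

-- number of weights the greedy absorbs before breaking
def pvBreakN : List Int → Int → Nat
  | [], _ => 0
  | w :: rest, a => if w > a + 1 then 0 else pvBreakN rest (a + w) + 1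

-- running prefix sums of s starting from a (without the leading a)
def pvSums : List Int → Int → List Int
  | [], _ => []
  | w :: rest, a => (a + w) :: pvSums rest (a + w)

lemma foldl_broken (s : List Int) (a : Int) :
    s.foldl
      (fun (st : Int × Bool) w =>
        if st.2 then st
        else if st.1 + 1 ≥ w then (st.1 + w, false) else (st.1, true))
      (a, true) = (a, true) := by
  induction s with
  | nil => rfl
  | cons w rest ih => simpa using ih

lemma loopA_eq_greedy (s : List Int) (a : Int) :
    (s.foldl
      (fun (st : Int × Bool) w =>
        if st.2 then st
        else if st.1 + 1 ≥ w then (st.1 + w, false) else (st.1, true))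
      (a, false)).1 + 1 = pvGreedy s a := by
  induction s generalizing a with
  | nil => rfl
  | cons w rest ih =>
    by_cases h : a + 1 ≥ w
    · have hng : ¬ w > a + 1 := by omega
      simp [List.foldl_cons, h, pvGreedy, hng, ih]
    · have hg : w > a + 1 := by omega
      simp [List.foldl_cons, h, pvGreedy, hg, foldl_broken]

lemma prefix_eq_sums (s : List Int) : ∀ (L : List Int) (a : Int),
    PySem.List.pyGetD L (-1) 0 = a → L ≠ [] →
    s.foldl (fun acc w => acc ++ [PySem.List.pyGetD acc (-1) 0 + w]) L = L ++ pvSums s a := by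
  induction s with
  | nil => intro L a _ _; simp [pvSums]
  | cons w rest ih =>
    intro L a hlast hne
    have h1 : PySem.List.pyGetD (L ++ [a + w]) (-1) 0 = a + w :=
      PySem.List.pyGetD_neg_one_append_singleton L (a + w) 0
    have := ih (L ++ [a + w]) (a + w) h1 (by simp)
    simp only [List.foldl_cons, hlast, this, pvSums]
    simp

lemma breakN_le_length (s : List Int) (a : Int) : pvBreakN s a ≤ s.length := by
  induction s generalizing a with
  | nil => simp [pvBreakN]
  | cons w rest ih =>
    by_cases h : w > a + 1 <;> simp [pvBreakN, h]
    exact ih (a + w)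

lemma greedy_eq_getD_break (s : List Int) (a : Int) :
    pvGreedy s a = (a :: pvSums s a).getD (pvBreakN s a) 0 + 1 := by
  induction s generalizing a with
  | nil => simp [pvGreedy, pvBreakN]
  | cons w rest ih =>
    by_cases h : w > a + 1
    · simp [pvGreedy, pvBreakN, h]
    · simpa [pvGreedy, pvBreakN, pvSums, h] using ih (a + w)

-- pvOk on the prefix-sum table of s decides membership below the greedy break point
lemma okzip : ∀ (s : List Int) (a : Int) (k : Nat), k ≤ s.length →
    (((((a :: pvSums s a).zip (s.take k)).all (fun pw => decide (pw.2 ≤ pw.1 + 1))) = true) ↔ k ≤ pvBreakN s a)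
  | [], a, k, hk => by
      have hk0 : k = 0 := Nat.le_zero.mp hk
      subst hk0; simp [pvBreakN]
  | w :: rest, a, 0, _ => by simp
  | w :: rest, a, (j+1), hk => by
      have hj : j ≤ rest.length := by simpa using hk
      have hIH := okzip rest (a + w) j hj
      by_cases h : w > a + 1
      · have hng : ¬ (w ≤ a + 1) := by omega
        simp [pvSums, pvBreakN, List.take_succ_cons, h, hng]
      · have hle : w ≤ a + 1 := by omega
        simp only [pvSums, pvBreakN, List.take_succ_cons, List.zip_cons_cons, List.all_cons,
          if_neg h, decide_eq_true_eq, Bool.and_eq_true, hIH]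
        omega

lemma ok_iff_le_break (s : List Int) (a : Int) (k : Nat) (hk : k ≤ s.length) :
    (pvOk (a :: pvSums s a) s (k : Int) = true ↔ k ≤ pvBreakN s a) := by
  rw [pvOk, PySem.List.slice_to_natCast]
  simpa using okzip s a k hk

-- the binary search converges to the greedy break point
lemma bsearch_eq_break (s : List Int) (a : Int) :
    ∀ (n : Nat) (lo hi : Int), (hi - lo).toNat ≤ n → 0 ≤ lo → hi ≤ (s.length : Int) →
      lo ≤ (pvBreakN s a : Int) → (pvBreakN s a : Int) ≤ hi →
      pvBsearch (a :: pvSums s a) s lo hi = (pvBreakN s a : Int) := by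
  intro n
  induction n with
  | zero =>
    intro lo hi hfuel h0 hlen hloK hKhi
    rw [pvBsearch]
    have : ¬ lo < hi := by omega
    simp only [this, dif_neg, not_false_iff]
    omega
  | succ m ih =>
    intro lo hi hfuel h0 hlen hloK hKhi
    rw [pvBsearch]
    by_cases hlt : lo < hi
    · simp only [hlt, dif_pos]
      have hb := PySem.Int.floordiv_two_mid_bounds (lo := lo + 1) (hi := hi) (by omega)
      have he : lo + hi + 1 = lo + 1 + hi := by ring
      rw [he]
      set mid := PySem.Int.floordiv (lo + 1 + hi) 2 with hmid
      have hmid0 : 0 ≤ mid := by omega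
      have hmidlen : mid.toNat ≤ s.length := by omega
      have hcast : (mid.toNat : Int) = mid := Int.toNat_of_nonneg hmid0
      have hiff := ok_iff_le_break s a mid.toNat hmidlen
      rw [hcast] at hiff
      by_cases hok : pvOk (a :: pvSums s a) s mid = true
      · have hK : mid ≤ (pvBreakN s a : Int) := by
          have := hiff.mp hok; omega
        simp only [hok, if_pos]
        exact ih mid hi (by omega) (by omega) hlen hK hKhi
      · have hK : (pvBreakN s a : Int) < mid := by
          by_contra hc
          exact hok (hiff.mpr (by omega))
        simp only [hok, if_neg, Bool.not_eq_true]
        exact ih lo (mid - 1) (by omega) h0 (by omega) hloK (by omega)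
    · simp only [hlt, dif_neg, not_false_iff]
      omega

-- ===== VERDICT (by name: the statement is the Claim_ definition above) =====
theorem solution_spec : Claim_equal_solution := by
  intro weight _
  unfold Spec_solution solution solution_alt
  set s := PySem.List.sorted weight (fun x => x) false with hs
  have hpre := prefix_eq_sums s [(0 : Int)] 0
    (by rw [PySem.List.pyGetD_neg_one [(0:Int)] 0 (by simp)]; rfl) (by simp)
  simp only [hpre, List.cons_append, List.nil_append]
  have hK := breakN_le_length s 0
  have hbs := bsearch_eq_break s 0 ((s.length : Int) - 0).toNat 0 (s.length : Int)
    (le_refl _) (le_refl _) (le_refl _) (by exact_mod_cast Int.natCast_nonneg _)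
    (by exact_mod_cast hK)
  rw [loopA_eq_greedy s 0, hbs, PySem.List.pyGetD_natCast, greedy_eq_getD_break]
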